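-- pv_equiv track=rewrite | github.com/DavidToneian/OpenMPCD | Analysis/MPCDAnalysis/PlotTools.py | findRangesOfEqualSign
-- ===== SOURCE A (Python) =====
-- def findRangesOfEqualSign(data):
-- 	if len(data) == 0:
-- 		return []
--
-- 	sign = None
-- 	lastPos = None
-- 	ranges = []
-- 	for index, value in enumerate(data):
-- 		pos = value >= 0
-- 		if sign is None:
-- 			sign = pos
-- 			lastPos = 0
-- 			continue
--
-- 		if pos != sign:
-- 			range_ = [lastPos, index]
-- 			ranges.append((range_, sign))
--
-- 			lastPos = index
-- 			sign = not sign
--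
-- 	range_ = [lastPos, len(data)]
-- 	ranges.append((range_, sign))
--
-- 	return ranges
-- ===== SOURCE B (Python) =====
-- def findRangesOfEqualSign(data):
-- 	signs = [value >= 0 for value in data]
-- 	if not signs:
-- 		return []
-- 	starts = [(0, signs[0])]
-- 	for index, (previous, current) in enumerate(zip(signs, signs[1:]), 1):
-- 		if current != previous:
-- 			starts.append((index, current))
-- 	ends = [index for index, _ in starts[1:]] + [len(signs)]
-- 	return [([start, end], sign) for (start, sign), end in zip(starts, ends)]
-- ===== Notes on version B (the rewrite author's own statement) =====
-- stated objective: alternative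
-- what changed: B first materialises the sign list and the table of run-start boundaries (indices where adjacent signs differ), then assembles the ranges by zipping each start with the next boundary, instead of A's single loop toggling a sign/lastPos state and emitting ranges inline.
import Mathlib
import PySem

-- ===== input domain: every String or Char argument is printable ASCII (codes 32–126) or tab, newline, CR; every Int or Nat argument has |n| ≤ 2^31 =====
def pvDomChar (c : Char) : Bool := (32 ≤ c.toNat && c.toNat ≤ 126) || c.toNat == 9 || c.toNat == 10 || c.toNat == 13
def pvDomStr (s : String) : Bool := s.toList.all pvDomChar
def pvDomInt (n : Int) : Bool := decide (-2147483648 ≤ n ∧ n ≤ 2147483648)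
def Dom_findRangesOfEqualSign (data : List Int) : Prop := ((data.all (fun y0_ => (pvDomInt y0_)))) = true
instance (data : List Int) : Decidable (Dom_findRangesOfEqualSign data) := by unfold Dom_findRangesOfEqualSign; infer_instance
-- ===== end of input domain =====

-- B builds the table of run-start boundaries first and assembles the ranges in a second pass,
-- instead of A's single toggle-state loop; objective: alternative decomposition (same cost).

-- ===== PORT A =====
-- A's loop body: state = (sign : Option Bool, lastPos, ranges)
def stepA (st : Option Bool × Int × List (List Int × Bool)) (p : Int × Int) :
    Option Bool × Int × List (List Int × Bool) :=
  let pos := decide (p.2 ≥ 0)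
  match st.1 with
  | none => (some pos, 0, st.2.2)                 -- sign = pos; lastPos = 0; continue
  | some sign =>
    if pos ≠ sign then
      (some (!sign), p.1, st.2.2 ++ [([st.2.1, p.1], sign)])
    else st

def findRangesOfEqualSign (data : List Int) : List (List Int × Bool) :=
  if data.length = 0 then []
  else
    let st := (PySem.List.enumerate data 0).foldl stepA (none, 0, [])
    -- after the loop sign is never None (data nonempty), so getD false is unreachable
    st.2.2 ++ [([st.2.1, (data.length : Int)], st.1.getD false)]

-- ===== PORT B =====
-- B's loop body: append (index, current) when the adjacent signs differ
def stepB (acc : List (Int × Bool)) (p : Int × (Bool × Bool)) : List (Int × Bool) :=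
  if p.2.2 ≠ p.2.1 then acc ++ [(p.1, p.2.2)] else acc

def findRangesOfEqualSign_alt (data : List Int) : List (List Int × Bool) :=
  let signs := data.map (fun value => decide (value ≥ 0))
  match signs with
  | [] => []
  | s0 :: _ =>
    let starts := (PySem.List.enumerate (signs.zip (signs.drop 1)) 1).foldl stepB [(0, s0)]
    let ends := (starts.drop 1).map (·.1) ++ [(signs.length : Int)]
    (starts.zip ends).map (fun q => ([q.1.1, q.2], q.1.2))

-- ===== PRECONDITION & SPEC =====
def Spec_findRangesOfEqualSign (data : List Int) (out : List (List Int × Bool)) : Prop := out = findRangesOfEqualSign_alt data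
instance (data : List Int) (out : List (List Int × Bool)) : Decidable (Spec_findRangesOfEqualSign data out) := by unfold Spec_findRangesOfEqualSign; infer_instance

-- ===== CLAIM (what is proved, stated in full; the proofs are below) =====
def Claim_equal_findRangesOfEqualSign : Prop := ∀ (data : List Int), Dom_findRangesOfEqualSign data → Spec_findRangesOfEqualSign data (findRangesOfEqualSign data)

-- ===== LEMMAS AND PROOFS =====

-- canonical run decomposition: current run started at lastPos with sign s, next index i, total length n
def runsAux (n : Int) : Int → Bool → Int → List Bool → List (List Int × Bool)
  | lastPos, s, _, [] => [([lastPos, n], s)]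
  | lastPos, s, i, c :: rest =>
    if c ≠ s then ([lastPos, i], s) :: runsAux n i c (i + 1) rest
    else runsAux n lastPos s (i + 1) rest

-- chain a starts table into ranges, closing the last one at n
def chainOf (n : Int) : List (Int × Bool) → List (List Int × Bool)
  | [] => []
  | [(a, s)] => [([a, n], s)]
  | (a, s) :: (b, t) :: rest => ([a, b], s) :: chainOf n ((b, t) :: rest)

theorem A_loop (n : Int) (l : List Int) (s : Bool) (lastPos : Int)
    (acc : List (List Int × Bool)) (i : Int) :
    (let st := (PySem.List.enumerate l i).foldl stepA (some s, lastPos, acc)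
     st.2.2 ++ [([st.2.1, n], st.1.getD false)])
      = acc ++ runsAux n lastPos s i (l.map (fun v => decide (v ≥ 0))) := by
  induction l generalizing s lastPos acc i with
  | nil => simp [runsAux]
  | cons x l ih =>
    simp only [PySem.List.enumerate_cons, List.foldl_cons, List.map_cons, runsAux]
    by_cases h : decide (x ≥ 0) = s
    · simp [stepA, h, ih]
    · have hb : (!s) = decide (x ≥ 0) := by
        cases s <;> cases hx : decide (x ≥ 0) <;> simp_all
      simp only [stepA, h, Ne, not_false_iff, if_pos]
      simp [hb, ih, List.append_assoc]

theorem A_eq (d : Int) (tail : List Int) :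
    findRangesOfEqualSign (d :: tail)
      = runsAux ((d :: tail).length : Int) 0 (decide (d ≥ 0)) 1
          (tail.map (fun v => decide (v ≥ 0))) := by
  have h := A_loop ((d :: tail).length : Int) tail (decide (d ≥ 0)) 0 [] 1
  simpa [findRangesOfEqualSign, PySem.List.enumerate_cons, stepA] using h

theorem chain_zip (n : Int) (st : List (Int × Bool)) :
    (st.zip ((st.drop 1).map (·.1) ++ [n])).map (fun q => ([q.1.1, q.2], q.1.2))
      = chainOf n st := by
  induction st with
  | nil => simp [chainOf]
  | cons a st ih =>
    cases st with
    | nil => simp [chainOf]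
    | cons b st => simpa [chainOf] using ih

theorem chain_runs (n : Int) (rest : List Bool) (prev : Bool) (lastPos i : Int) :
    chainOf n ((lastPos, prev) ::
        ((PySem.List.enumerate ((prev :: rest).zip rest) i).foldl stepB []))
      = runsAux n lastPos prev i rest := by
  induction rest generalizing prev lastPos i with
  | nil => simp [chainOf, runsAux]
  | cons c rest ih =>
    simp only [List.zip_cons_cons, PySem.List.enumerate_cons, List.foldl_cons, runsAux]
    by_cases h : c = prev
    · simpa [stepB, h] using ih c lastPos (i + 1)
    · have hfold : ∀ (l : List (Int × (Bool × Bool))) (a : List (Int × Bool)),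
          l.foldl stepB a = a ++ l.foldl stepB [] := by
        intro l
        induction l with
        | nil => simp
        | cons x l ihl =>
          intro a
          simp only [List.foldl_cons]
          rw [ihl (stepB a x), ihl (stepB [] x)]
          simp [stepB]; split <;> simp
      simp only [stepB, h, Ne, not_false_iff, if_pos, List.nil_append]
      rw [hfold]
      have := ih c i (i + 1)
      rw [hfold] at this
      simp only [List.nil_append] at this
      cases hst : (PySem.List.enumerate ((c :: rest).zip rest) (i + 1)).foldl stepB [] with
      | nil => rw [hst] at this; simpa [chainOf, this, h]
      | cons y ys =>
        rw [hst] at this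
        cases y with
        | mk y1 y2 => simpa [chainOf, this, h]

theorem B_eq (d : Int) (tail : List Int) :
    findRangesOfEqualSign_alt (d :: tail)
      = runsAux ((d :: tail).length : Int) 0 (decide (d ≥ 0)) 1
          (tail.map (fun v => decide (v ≥ 0))) := by
  have hfold : ∀ (l : List (Int × (Bool × Bool))) (a : List (Int × Bool)),
      l.foldl stepB a = a ++ l.foldl stepB [] := by
    intro l
    induction l with
    | nil => simp
    | cons x l ihl =>
      intro a
      simp only [List.foldl_cons]
      rw [ihl (stepB a x), ihl (stepB [] x)]
      simp [stepB]; split <;> simp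
  simp only [findRangesOfEqualSign_alt, List.map_cons, List.drop_succ_cons, List.drop_zero]
  rw [hfold]
  simp only [List.singleton_append]
  rw [chain_zip]
  simp only [List.length_cons, List.length_map]
  exact chain_runs _ _ _ _ _

-- ===== VERDICT (by name: the statement is the Claim_ definition above) =====
theorem findRangesOfEqualSign_spec : Claim_equal_findRangesOfEqualSign := by
  intro data _
  unfold Spec_findRangesOfEqualSign
  cases data with
  | nil => rfl
  | cons d tail => rw [A_eq, B_eq]
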